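-- pv_equiv track=rewrite | github.com/angelicstrike/Crypto | Hadamard.py | HadamardGenerate
-- ===== SOURCE A (Python) =====
-- def IntToBinary(x, num_bits):
--     string = list()
--     temp = x
--     while(temp > 0 and len(string) < num_bits):
--         string.insert(0,temp%2)
--         temp = int(temp/2)
--
--     while(len(string) < num_bits):
--         string.insert(0, 0)
--
--     return string
--
-- def HadamardGenerate(n):
--     H = list()
--     for i in range(n):
--         H.append(list())
--         i_str = IntToBinary(i, 5)
--         for j in range(n):
--             j_str = IntToBinary(j,5)
--             temp = 0
--             for x in range(5):
--                 temp += i_str[x]*j_str[x]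
--             H[i].append((-1)**temp)
--
--     return H
-- ===== SOURCE B (Python) =====
-- def HadamardGenerate(n):
--     return [[1 - 2 * ((i & j & 31).bit_count() & 1) for j in range(n)]
--             for i in range(n)]
-- ===== Notes on version B (the rewrite author's own statement) =====
-- stated objective: simpler
-- what changed: Replaced the IntToBinary digit-list helper and the inner 5-step dot-product loop by a direct per-entry formula 1 - 2*((i & j & 31).bit_count() & 1), keeping only the two range(n) traversals as comprehensions.
import Mathlib
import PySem

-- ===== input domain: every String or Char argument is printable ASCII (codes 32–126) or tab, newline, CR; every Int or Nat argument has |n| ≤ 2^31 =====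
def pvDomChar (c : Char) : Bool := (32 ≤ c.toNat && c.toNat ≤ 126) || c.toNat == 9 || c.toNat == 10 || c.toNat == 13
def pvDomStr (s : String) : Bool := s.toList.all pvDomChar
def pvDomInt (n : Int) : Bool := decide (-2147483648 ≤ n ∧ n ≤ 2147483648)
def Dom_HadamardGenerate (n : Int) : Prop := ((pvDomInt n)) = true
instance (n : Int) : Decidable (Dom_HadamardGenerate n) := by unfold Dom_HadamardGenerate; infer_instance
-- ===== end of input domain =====

-- B replaces the 5-bit digit-list construction and the inner dot-product loop by a single
-- popcount-parity formula per entry: simpler (no helper, no inner loops), same O(n^2) output.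

-- ===== PORT A =====
-- 'while temp > 0 and len(string) < num_bits': each iteration grows the list by one, so the
-- loop runs at most num_bits times; fuel numBits.toNat is exact, the length test stays in the body.
def i2bLoop (fuel : Nat) (numBits temp : Int) (s : List Int) : List Int :=
  match fuel with
  | 0 => s
  | f+1 =>
    if temp > 0 ∧ (s.length : Int) < numBits then
      -- int(temp/2) is float division truncated: PySem.Int.truncdiv (exact, |temp| ≤ 2^31 < 2^53)
      i2bLoop f numBits (PySem.Int.truncdiv temp 2) (PySem.Int.mod temp 2 :: s)
    else s

-- 'while len(string) < num_bits: string.insert(0, 0)': same fuel argument.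
def i2bPad (fuel : Nat) (numBits : Int) (s : List Int) : List Int :=
  match fuel with
  | 0 => s
  | f+1 => if (s.length : Int) < numBits then i2bPad f numBits ((0:Int) :: s) else s

def IntToBinary (x numBits : Int) : List Int :=
  i2bPad numBits.toNat numBits (i2bLoop numBits.toNat numBits x [])

def HadamardGenerate (n : Int) : List (List Int) :=
  (PySem.List.pyRange 0 n).foldl (fun H i =>
    let iStr := IntToBinary i 5
    H ++ [(PySem.List.pyRange 0 n).foldl (fun row j =>
      let jStr := IntToBinary j 5
      -- i_str[x] / j_str[x]: x ∈ range(5) and both lists always have length 5, so the index is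
      -- always in range; pyGetD is the total in-range form (default never reached).
      let temp := (PySem.List.pyRange 0 5).foldl
        (fun t x => t + PySem.List.pyGetD iStr x 0 * PySem.List.pyGetD jStr x 0) 0
      -- (-1)**temp: temp is a sum of products of 0/1 digits, hence ≥ 0
      row ++ [(-1 : Int) ^ temp.toNat]) []]) []

-- ===== PORT B =====
-- Source B: [[1 - 2 * ((i & j & 31).bit_count() & 1) for j in range(n)] for i in range(n)]
def HadamardGenerate_alt (n : Int) : List (List Int) :=
  (PySem.List.pyRange 0 n).map (fun i =>
    (PySem.List.pyRange 0 n).map (fun j =>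
      1 - 2 * PySem.Int.band
        ((PySem.Int.bitCount (PySem.Int.band (PySem.Int.band i j) 31) : Nat) : Int) 1))

-- ===== PRECONDITION & SPEC =====
def Spec_HadamardGenerate (n : Int) (out : List (List Int)) : Prop := out = HadamardGenerate_alt n
instance (n : Int) (out : List (List Int)) : Decidable (Spec_HadamardGenerate n out) := by unfold Spec_HadamardGenerate; infer_instance

-- ===== CLAIM (what is proved, stated in full; the proofs are below) =====
def Claim_equal_HadamardGenerate : Prop := ∀ (n : Int), Dom_HadamardGenerate n → Spec_HadamardGenerate n (HadamardGenerate n)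

-- ===== LEMMAS AND PROOFS =====

-- one-entry views of the two inner loop bodies (exactly the zeta-reduced lambda bodies)
def entryA (i j : Int) : Int :=
  (-1 : Int) ^ ((PySem.List.pyRange 0 5).foldl
    (fun t x => t + PySem.List.pyGetD (IntToBinary i 5) x 0
                  * PySem.List.pyGetD (IntToBinary j 5) x 0) 0).toNat

def entryB (i j : Int) : Int :=
  1 - 2 * PySem.Int.band
    ((PySem.Int.bitCount (PySem.Int.band (PySem.Int.band i j) 31) : Nat) : Int) 1

lemma loopStepPos (f : Nat) (nb t : Int) (s : List Int) (ht : 0 < t)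
    (hlen : (s.length : Int) < nb) :
    i2bLoop (f+1) nb t s = i2bLoop f nb (t/2) (t%2 :: s) := by
  show (if t > 0 ∧ (s.length : Int) < nb then
      i2bLoop f nb (PySem.Int.truncdiv t 2) (PySem.Int.mod t 2 :: s) else s) = _
  rw [if_pos ⟨ht, hlen⟩]
  congr 1
  · simp [PySem.Int.truncdiv, Int.tdiv_eq_ediv]; omega
  · rw [PySem.Int.mod_eq_emod_of_pos (by norm_num)]

lemma loopStepStop (f : Nat) (nb t : Int) (s : List Int) (ht : ¬ 0 < t) :
    i2bLoop (f+1) nb t s = s := by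
  show (if t > 0 ∧ (s.length : Int) < nb then _ else s) = s
  rw [if_neg (fun hc => ht hc.1)]

lemma loopZero (nb t : Int) (s : List Int) : i2bLoop 0 nb t s = s := rfl

lemma padStep (f : Nat) (nb : Int) (s : List Int) (hlen : (s.length : Int) < nb) :
    i2bPad (f+1) nb s = i2bPad f nb ((0:Int) :: s) := by
  show (if (s.length : Int) < nb then _ else s) = _
  rw [if_pos hlen]

lemma padStop (f : Nat) (nb : Int) (s : List Int) (hlen : ¬ (s.length : Int) < nb) :
    i2bPad (f+1) nb s = s := by
  show (if (s.length : Int) < nb then _ else s) = s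
  rw [if_neg hlen]

lemma i2b_closed (i : Int) (h : 0 ≤ i) :
    IntToBinary i 5 = [i/2/2/2/2%2, i/2/2/2%2, i/2/2%2, i/2%2, i%2] := by
  show i2bPad 5 5 (i2bLoop 5 5 i []) = _
  by_cases h1 : 0 < i
  · rw [loopStepPos 4 5 i [] h1 (by simp)]
    by_cases h2 : 0 < i/2
    · rw [loopStepPos 3 5 _ _ h2 (by simp)]
      by_cases h3 : 0 < i/2/2
      · rw [loopStepPos 2 5 _ _ h3 (by simp)]
        by_cases h4 : 0 < i/2/2/2
        · rw [loopStepPos 1 5 _ _ h4 (by simp)]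
          by_cases h5 : 0 < i/2/2/2/2
          · rw [loopStepPos 0 5 _ _ h5 (by simp), loopZero, padStop 4 5 _ (by simp)]
          · rw [loopStepStop 0 5 _ _ h5, padStep 4 5 _ (by simp), padStop 3 5 _ (by simp)]
            simp only [List.cons.injEq, and_true]
            omega
        · rw [loopStepStop 1 5 _ _ h4, padStep 4 5 _ (by simp), padStep 3 5 _ (by simp),
            padStop 2 5 _ (by simp)]
          simp only [List.cons.injEq, and_true]
          omega
      · rw [loopStepStop 2 5 _ _ h3, padStep 4 5 _ (by simp), padStep 3 5 _ (by simp),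
          padStep 2 5 _ (by simp), padStop 1 5 _ (by simp)]
        simp only [List.cons.injEq, and_true]
        omega
    · rw [loopStepStop 3 5 _ _ h2, padStep 4 5 _ (by simp), padStep 3 5 _ (by simp),
        padStep 2 5 _ (by simp), padStep 1 5 _ (by simp), padStop 0 5 _ (by simp)]
      simp only [List.cons.injEq, and_true]
      omega
  · have : i = 0 := by omega
    subst this
    decide

-- IntToBinary keeps only the 5 low bits: it depends on i only through i % 32
lemma i2b_period (i : Int) (h : 0 ≤ i) : IntToBinary i 5 = IntToBinary (i % 32) 5 := by
  rw [i2b_closed i h, i2b_closed (i % 32) (by omega)]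
  simp only [List.cons.injEq, and_true]
  omega

-- low-5-bit mask commutes with reduction mod 32 (Nat side)
lemma mask_mod (x y : Nat) : ((x % 32) &&& (y % 32)) &&& 31 = (x &&& y) &&& 31 := by
  apply Nat.eq_of_testBit_eq
  intro k
  have h31 : (31:Nat) = 2^5 - 1 := by norm_num
  have h32 : (32:Nat) = 2^5 := by norm_num
  rw [h31, h32]
  simp only [Nat.testBit_and, Nat.testBit_mod_two_pow, Nat.testBit_two_pow_sub_one]
  by_cases hk : k < 5 <;> simp [hk]

lemma band_period (i j : Int) (hi : 0 ≤ i) (hj : 0 ≤ j) :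
    PySem.Int.band (PySem.Int.band i j) 31 =
      PySem.Int.band (PySem.Int.band (i % 32) (j % 32)) 31 := by
  rw [PySem.Int.band_of_nonneg hi hj,
      PySem.Int.band_of_nonneg (a := i % 32) (b := j % 32) (by omega) (by omega),
      PySem.Int.band_of_nonneg (by positivity) (by norm_num),
      PySem.Int.band_of_nonneg (by positivity) (by norm_num)]
  have h1 : (i % 32).toNat = i.toNat % 32 := by omega
  have h2 : (j % 32).toNat = j.toNat % 32 := by omega
  rw [h1, h2]
  norm_num
  exact (mask_mod i.toNat j.toNat).symm

lemma entryA_period (i j : Int) (hi : 0 ≤ i) (hj : 0 ≤ j) :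
    entryA i j = entryA (i % 32) (j % 32) := by
  unfold entryA
  rw [i2b_period i hi, i2b_period j hj]

lemma entryB_period (i j : Int) (hi : 0 ≤ i) (hj : 0 ≤ j) :
    entryB i j = entryB (i % 32) (j % 32) := by
  unfold entryB
  rw [band_period i j hi hj]

lemma entry_small : ∀ a : Nat, a < 32 → ∀ b : Nat, b < 32 →
    entryA (a : Int) (b : Int) = entryB (a : Int) (b : Int) := by decide

lemma entry_eq (i j : Int) (hi : 0 ≤ i) (hj : 0 ≤ j) : entryA i j = entryB i j := by
  rw [entryA_period i j hi hj, entryB_period i j hi hj]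
  have ha : ((i % 32).toNat : Int) = i % 32 := by omega
  have hb : ((j % 32).toNat : Int) = j % 32 := by omega
  rw [← ha, ← hb]
  exact entry_small _ (by omega) _ (by omega)

lemma portA_map (n : Int) :
    HadamardGenerate n = (PySem.List.pyRange 0 n).map (fun i =>
      (PySem.List.pyRange 0 n).map (fun j => entryA i j)) := by
  simp only [HadamardGenerate, entryA, PySem.List.foldl_append_singleton_eq_map,
    List.nil_append]

lemma portB_map (n : Int) :
    HadamardGenerate_alt n = (PySem.List.pyRange 0 n).map (fun i =>
      (PySem.List.pyRange 0 n).map (fun j => entryB i j)) := rfl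

-- ===== VERDICT (by name: the statement is the Claim_ definition above) =====
theorem HadamardGenerate_spec : Claim_equal_HadamardGenerate := by
  intro n _
  show HadamardGenerate n = HadamardGenerate_alt n
  rw [portA_map, portB_map]
  apply List.map_congr_left
  intro i hi
  apply List.map_congr_left
  intro j hj
  exact entry_eq i j (PySem.List.mem_pyRange_one.1 hi).1 (PySem.List.mem_pyRange_one.1 hj).1
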